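-- pv_equiv track=rewrite | github.com/ducthawg308/AI_Marketer_Pro | ml_microservice/app/services/optimize_service.py | add_call_to_action
-- ===== SOURCE A (Python) =====
-- CTA_PHRASES = [
--     "Join now!", "Sign up today!", "Get started!", "Buy now!",
--     "Learn more!", "Contact us!", "Don't miss out!", "Limited time!",
--     "Claim your spot!", "Start your journey!", "Experience the difference!",
--     "Upgrade now!", "See results!", "Try it now!"
-- ]
--
-- def add_call_to_action(content):
--     """Add or enhance call-to-action if missing"""
--     content_lower = content.lower()
--
--     # Check if CTA already exists
--     has_cta = any(phrase.lower()[:-1] in content_lower for phrase in CTA_PHRASES)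
--
--     if not has_cta:
--         cta = CTA_PHRASES[len(content) % len(CTA_PHRASES)]
--         # Add CTA at natural break point
--         sentences = content.split('.')
--         if len(sentences) > 1:
--             sentences[-2] = sentences[-2] + " " + cta
--         else:
--             sentences.append(" " + cta)
--         return '.'.join(sentences)
--
--     return content
-- ===== SOURCE B (Python) =====
-- CTA_PHRASES = [
--     "Join now!", "Sign up today!", "Get started!", "Buy now!",
--     "Learn more!", "Contact us!", "Don't miss out!", "Limited time!",
--     "Claim your spot!", "Start your journey!", "Experience the difference!",
--     "Upgrade now!", "See results!", "Try it now!"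
-- ]
--
-- def add_call_to_action(content):
--     """Add or enhance call-to-action if missing"""
--     content_lower = content.lower()
--     if any(phrase.lower()[:-1] in content_lower for phrase in CTA_PHRASES):
--         return content
--     cta = CTA_PHRASES[len(content) % len(CTA_PHRASES)]
--     idx = content.rfind('.')
--     if idx == -1:
--         return content + ". " + cta
--     return content[:idx] + " " + cta + content[idx:]
-- ===== Notes on version B (the rewrite author's own statement) =====
-- stated objective: simpler
-- what changed: Replaces the split-on-'.'/mutate-sentences[-2]/re-join insertion with a direct rfind('.') position splice: append '. '+cta when there is no period, otherwise slice the string around the last period; no segment list is ever built.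
import Mathlib
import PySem

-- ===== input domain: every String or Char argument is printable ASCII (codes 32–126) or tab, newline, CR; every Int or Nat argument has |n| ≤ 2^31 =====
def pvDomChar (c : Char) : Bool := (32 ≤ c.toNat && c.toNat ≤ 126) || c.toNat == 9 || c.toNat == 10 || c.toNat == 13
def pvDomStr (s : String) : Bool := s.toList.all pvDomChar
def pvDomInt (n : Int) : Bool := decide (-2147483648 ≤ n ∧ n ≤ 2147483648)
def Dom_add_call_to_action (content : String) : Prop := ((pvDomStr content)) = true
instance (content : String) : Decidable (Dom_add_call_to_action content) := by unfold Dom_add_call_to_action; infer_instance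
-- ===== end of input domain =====

-- B replaces A's split('.')/mutate-sentences[-2]/re-join insertion by a direct rfind('.')
-- position splice (a different decomposition, same O(n) cost); return values proved equal.


-- module-level constant shared by both Pythons
def CTA_PHRASES : List String :=
  ["Join now!", "Sign up today!", "Get started!", "Buy now!",
   "Learn more!", "Contact us!", "Don't miss out!", "Limited time!",
   "Claim your spot!", "Start your journey!", "Experience the difference!",
   "Upgrade now!", "See results!", "Try it now!"]

-- ===== PORT A =====
-- literal transliteration of A; 'sentences[-2] = sentences[-2] + " " + cta' becomes a
-- pyGet? at -2 plus List.set at length-2 (the same position, since length > 1 there);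
-- the .getD defaults are never taken: the CTA index is a mod into a nonempty list and
-- split? with the nonempty separator "." never returns none.
def add_call_to_action (content : String) : String :=
  let content_lower := PySem.Str.lower content
  let has_cta := CTA_PHRASES.any (fun phrase =>
    PySem.Str.isIn (PySem.Str.slice (PySem.Str.lower phrase) none (some (-1))) content_lower)
  if !has_cta then
    let cta := (PySem.List.pyGet? CTA_PHRASES
      (PySem.Int.mod (PySem.Str.len content) (CTA_PHRASES.length : Int))).getD ""
    let sentences := (PySem.Str.split? content ".").getD []
    if 1 < sentences.length then
      let sentences := sentences.set (sentences.length - 2)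
        (((PySem.List.pyGet? sentences (-2)).getD "") ++ " " ++ cta)
      PySem.Str.join "." sentences
    else
      PySem.Str.join "." (sentences ++ [" " ++ cta])
  else content

-- ===== PORT B =====
-- literal transliteration of B (Source B): splice at content.rfind('.')
def add_call_to_action_alt (content : String) : String :=
  let content_lower := PySem.Str.lower content
  if CTA_PHRASES.any (fun phrase =>
      PySem.Str.isIn (PySem.Str.slice (PySem.Str.lower phrase) none (some (-1))) content_lower) then
    content
  else
    let cta := (PySem.List.pyGet? CTA_PHRASES
      (PySem.Int.mod (PySem.Str.len content) (CTA_PHRASES.length : Int))).getD ""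
    let idx := PySem.Str.rfind content "."
    if idx = -1 then content ++ ". " ++ cta
    else PySem.Str.slice content none (some idx) ++ " " ++ cta ++ PySem.Str.slice content (some idx) none

-- ===== PRECONDITION & SPEC =====
def Spec_add_call_to_action (content : String) (out : String) : Prop := out = add_call_to_action_alt content
instance (content : String) (out : String) : Decidable (Spec_add_call_to_action content out) := by unfold Spec_add_call_to_action; infer_instance

-- ===== CLAIM (what is proved, stated in full; the proofs are below) =====
def Claim_equal_add_call_to_action : Prop := ∀ (content : String), Dom_add_call_to_action content → Spec_add_call_to_action content (add_call_to_action content)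

-- ===== LEMMAS AND PROOFS =====

-- reference shape of splitOn on the single-character separator '.'
def dotSplit (pre : List Char) : List Char → List (List Char)
  | [] => [pre]
  | c :: rest => if c = '.' then pre :: dotSplit [] rest else dotSplit (pre ++ [c]) rest

theorem go_succ_nil (n : Nat) (sep cur : List Char) (acc : List (List Char)) :
    PySem.Chars.splitOn.go sep (n + 1) [] cur acc = (cur.reverse :: acc).reverse := by
  rw [PySem.Chars.splitOn.go.eq_def]

theorem go_succ_cons (n : Nat) (sep : List Char) (c : Char) (rest cur : List Char)
    (acc : List (List Char)) :
    PySem.Chars.splitOn.go sep (n + 1) (c :: rest) cur acc =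
      if sep.isPrefixOf (c :: rest) then
        PySem.Chars.splitOn.go sep n (List.drop sep.length (c :: rest)) [] (cur.reverse :: acc)
      else PySem.Chars.splitOn.go sep n rest (c :: cur) acc := by
  rw [PySem.Chars.splitOn.go.eq_def]

theorem splitOn_go_spec (fuel : Nat) : ∀ (l cur : List Char) (acc : List (List Char)),
    l.length < fuel →
    PySem.Chars.splitOn.go ['.'] fuel l cur acc = acc.reverse ++ dotSplit cur.reverse l := by
  induction fuel with
  | zero => intro l cur acc h; omega
  | succ n ih =>
    intro l cur acc h
    rcases l with _ | ⟨c, rest⟩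
    · rw [go_succ_nil]
      simp [dotSplit]
    · rw [go_succ_cons]
      by_cases hc : c = '.'
      · subst hc
        rw [if_pos (by simp [List.isPrefixOf])]
        rw [ih _ _ _ (by simpa using Nat.lt_of_succ_lt_succ h)]
        simp [dotSplit]
      · rw [if_neg (by simp [List.isPrefixOf]; exact fun h' => (hc h'.symm).elim)]
        rw [ih rest (c :: cur) acc (by simpa using Nat.lt_of_succ_lt_succ h)]
        simp [dotSplit, hc]

theorem splitOn_dot (cs : List Char) : PySem.Chars.splitOn cs ['.'] = dotSplit [] cs := by
  show PySem.Chars.splitOn.go ['.'] (cs.length + 1) cs [] [] = dotSplit [] cs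
  rw [splitOn_go_spec (cs.length + 1) cs [] [] (by omega)]
  rfl

theorem dotSplit_ne_nil (l pre : List Char) : dotSplit pre l ≠ [] := by
  induction l generalizing pre with
  | nil => simp [dotSplit]
  | cons c rest ih => by_cases hc : c = '.' <;> simp [dotSplit, hc, ih]

theorem dotSplit_nodot (l : List Char) : ∀ pre, '.' ∉ l → dotSplit pre l = [pre ++ l] := by
  induction l with
  | nil => intro pre _; simp [dotSplit]
  | cons c rest ih =>
    intro pre h
    have hc : c ≠ '.' := fun hh => h (by simp [hh])
    simp only [dotSplit, if_neg hc]
    rw [ih _ (fun hh => h (by simp [hh]))]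
    simp

theorem dotSplit_append (a : List Char) : ∀ pre b,
    dotSplit pre (a ++ '.' :: b) = dotSplit pre a ++ dotSplit [] b := by
  induction a with
  | nil => intro pre b; simp [dotSplit]
  | cons c rest ih =>
    intro pre b
    by_cases hc : c = '.' <;> simp [dotSplit, hc, ih]

theorem join_dotSplit (l : List Char) : ∀ pre, PySem.Chars.join ['.'] (dotSplit pre l) = pre ++ l := by
  induction l with
  | nil => intro pre; simp [dotSplit, PySem.Chars.join_singleton]
  | cons c rest ih =>
    intro pre
    by_cases hc : c = '.'
    · subst hc
      simp only [dotSplit, if_true]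
      rcases hq : dotSplit [] rest with _ | ⟨q, qs⟩
      · exact (dotSplit_ne_nil rest [] hq).elim
      · rw [PySem.Chars.join_cons_cons]
        have h2 := ih []
        rw [hq] at h2
        rw [h2]
        simp
    · simp only [dotSplit, if_neg hc]
      rw [ih (pre ++ [c])]
      simp

theorem join_append_one (ps : List (List Char)) (b : List Char) (h : ps ≠ []) :
    PySem.Chars.join ['.'] (ps ++ [b]) = PySem.Chars.join ['.'] ps ++ '.' :: b := by
  induction ps with
  | nil => exact (h rfl).elim
  | cons x t ih =>
    rcases t with _ | ⟨y, t'⟩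
    · simp [PySem.Chars.join_cons_cons, PySem.Chars.join_singleton]
    · simp only [List.cons_append] at ih ⊢
      rw [PySem.Chars.join_cons_cons, ih (by simp), PySem.Chars.join_cons_cons]
      simp

theorem join_mod_last (qs : List (List Char)) (q u : List Char) :
    PySem.Chars.join ['.'] (qs ++ [q ++ u]) = PySem.Chars.join ['.'] (qs ++ [q]) ++ u := by
  rcases qs with _ | ⟨x, t⟩
  · simp [PySem.Chars.join_singleton]
  · rw [join_append_one _ _ (by simp), join_append_one _ _ (by simp)]
    simp

theorem set_concat2 {α : Type} (qs : List α) (q b v : α) :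
    (qs ++ [q, b]).set qs.length v = qs ++ [v, b] := by
  induction qs with
  | nil => rfl
  | cons x t ih => simp [ih]

theorem pyGet?_penult {α : Type} (qs : List α) (q b : α) :
    PySem.List.pyGet? (qs ++ [q, b]) (-2) = some q := by
  simp only [PySem.List.pyGet?, PySem.List.pyIdx?, List.length_append]
  norm_num
  rw [List.getElem_append_right (by omega)]
  simp

theorem prefix_dot (l : List Char) : (['.'].isPrefixOf l = true) ↔ ∃ t, l = '.' :: t := by
  rcases l with _ | ⟨c, t⟩
  · simp [List.isPrefixOf]
  · simp [List.isPrefixOf]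
    exact eq_comm

theorem not_prefix_dot (s : List Char) (hs : '.' ∉ s) (i : Nat) :
    ¬ (['.'].isPrefixOf (s.drop i) = true) := by
  intro h
  obtain ⟨t, ht⟩ := (prefix_dot _).mp h
  have : '.' ∈ s.drop i := by rw [ht]; simp
  exact hs (List.mem_of_mem_drop this)

theorem rfind_go_nodot (s : List Char) (hs : '.' ∉ s) : ∀ j, PySem.Chars.rfind.go s ['.'] j = -1 := by
  intro j
  induction j with
  | zero =>
    rw [PySem.Chars.rfind.go.eq_def]
    simp only []
    rw [if_neg (by simpa using not_prefix_dot s hs 0)]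
  | succ n ih =>
    rw [PySem.Chars.rfind.go.eq_def]
    simp only []
    rw [if_neg (not_prefix_dot s hs (n + 1))]
    exact ih

theorem rfind_nodot (cs : List Char) (h : '.' ∉ cs) : PySem.Chars.rfind cs ['.'] = -1 :=
  rfind_go_nodot cs h cs.length

theorem rfind_go_last (a b : List Char) (hb : '.' ∉ b) :
    ∀ d, PySem.Chars.rfind.go (a ++ '.' :: b) ['.'] (a.length + d) = a.length := by
  intro d
  induction d with
  | zero =>
    simp only [Nat.add_zero]
    rcases ha : a.length with _ | k
    · rw [PySem.Chars.rfind.go.eq_def]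
      have h0 : a = [] := List.length_eq_zero_iff.mp ha
      subst h0
      simp
    · rw [PySem.Chars.rfind.go.eq_def]
      simp only []
      rw [if_pos]
      · rw [show (k:Nat) + 1 = a.length from ha.symm]
        have hdl : List.drop a.length (a ++ '.' :: b) = '.' :: b := List.drop_left
        rw [hdl]
        simp
  | succ d ih =>
    have h1 : a.length + (d + 1) = (a.length + d) + 1 := by omega
    rw [h1, PySem.Chars.rfind.go.eq_def]
    simp only []
    rw [if_neg, ih]
    have hdrop : (a ++ '.' :: b).drop (a.length + (d + 1)) = b.drop d := by
      rw [List.drop_length_add_append]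
      simp
    rw [show a.length + d + 1 = a.length + (d + 1) by omega, hdrop]
    exact not_prefix_dot b hb d

theorem rfind_last (a b : List Char) (hb : '.' ∉ b) :
    PySem.Chars.rfind (a ++ '.' :: b) ['.'] = a.length := by
  show PySem.Chars.rfind.go (a ++ '.' :: b) ['.'] (a ++ '.' :: b).length = a.length
  have : (a ++ '.' :: b).length = a.length + (b.length + 1) := by simp
  rw [this]
  exact rfind_go_last a b hb (b.length + 1)

theorem lastdot (cs : List Char) (h : '.' ∈ cs) : ∃ a b, cs = a ++ '.' :: b ∧ '.' ∉ b := by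
  induction cs with
  | nil => simp at h
  | cons c rest ih =>
    by_cases hr : '.' ∈ rest
    · obtain ⟨a, b, hab, hnb⟩ := ih hr
      exact ⟨c :: a, b, by simp [hab], hnb⟩
    · have hc : c = '.' := by
        rcases List.mem_cons.mp h with h | h
        · exact h.symm
        · exact (hr h).elim
      exact ⟨[], rest, by simp [hc], hr⟩

-- ===== VERDICT (by name: the statement is the Claim_ definition above) =====
theorem add_call_to_action_spec : Claim_equal_add_call_to_action := by
  intro content _
  unfold Spec_add_call_to_action add_call_to_action add_call_to_action_alt
  by_cases hcta : (CTA_PHRASES.any fun phrase =>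
      PySem.Str.isIn (PySem.Str.slice (PySem.Str.lower phrase) none (some (-1)))
        (PySem.Str.lower content)) = true
  · simp only [hcta, Bool.not_true, Bool.false_eq_true, if_false, if_pos]
  · have hf : (CTA_PHRASES.any fun phrase =>
        PySem.Str.isIn (PySem.Str.slice (PySem.Str.lower phrase) none (some (-1)))
          (PySem.Str.lower content)) = false := by
      simpa using hcta
    simp only [hf, Bool.not_false, if_true, Bool.false_eq_true, if_false]
    set cta := (PySem.List.pyGet? CTA_PHRASES
      (PySem.Int.mod (PySem.Str.len content) (CTA_PHRASES.length : Int))).getD "" with hcdef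
    clear hcdef hf hcta
    have hsplit : (PySem.Str.split? content ".").getD [] =
        (dotSplit [] content.toList).map String.ofList := by
      simp [PySem.Str.split?, PySem.Chars.split?, splitOn_dot]
    by_cases hdot : '.' ∈ content.toList
    · obtain ⟨a, b, hab, hnb⟩ := lastdot _ hdot
      obtain ⟨qs, q, hqq⟩ : ∃ qs q, dotSplit [] a = qs ++ [q] := by
        rcases List.eq_nil_or_concat (dotSplit [] a) with h0 | ⟨L, x, hl⟩
        · exact (dotSplit_ne_nil a [] h0).elim
        · exact ⟨L, x, by simpa using hl⟩
      have hds : dotSplit [] content.toList = qs ++ [q, b] := by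
        rw [hab, dotSplit_append, dotSplit_nodot b [] hnb, hqq]
        simp
      have hsent : (PySem.Str.split? content ".").getD [] =
          (qs.map String.ofList) ++ [String.ofList q, String.ofList b] := by
        rw [hsplit, hds]; simp
      rw [hsent]
      have hlen : ((qs.map String.ofList) ++ [String.ofList q, String.ofList b]).length
          = qs.length + 2 := by simp
      rw [if_pos (by rw [hlen]; omega)]
      have hrf : PySem.Str.rfind content "." = (a.length : Int) := by
        show PySem.Chars.rfind content.toList ['.'] = (a.length : Int)
        rw [hab]
        exact rfind_last a b hnb
      rw [hrf, if_neg (by omega)]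
      rw [pyGet?_penult, hlen]
      have hidx : qs.length + 2 - 2 = (qs.map String.ofList).length := by simp
      rw [hidx, set_concat2]
      refine String.toList_inj.mp ?_
      have hLHS : (PySem.Str.join "." ((qs.map String.ofList) ++
          [(Option.some (String.ofList q)).getD "" ++ " " ++ cta, String.ofList b])).toList
          = PySem.Chars.join ['.'] (qs ++ [q ++ ' ' :: cta.toList, b]) := by
        rw [PySem.Str.toList_join]
        congr 1
        simp [List.map_map, Function.comp_def]
      rw [hLHS]
      have hjoin : PySem.Chars.join ['.'] (qs ++ [q ++ ' ' :: cta.toList, b])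
          = a ++ ' ' :: cta.toList ++ '.' :: b := by
        rw [show qs ++ [q ++ ' ' :: cta.toList, b]
            = (qs ++ [q ++ ' ' :: cta.toList]) ++ [b] by simp]
        rw [join_append_one _ _ (by simp), join_mod_last, ← hqq, join_dotSplit]
        simp
      rw [hjoin]
      have hsl1 : (PySem.Str.slice content none (some (a.length : Int))).toList = a := by
        rw [PySem.Str.toList_slice]
        rw [show PySem.Chars.slice content.toList none (some (a.length : Int))
            = content.toList.take (a.length : Int).toNat from PySem.List.slice_to _ (by omega)]
        rw [hab]
        simp
      have hsl2 : (PySem.Str.slice content (some (a.length : Int)) none).toList = '.' :: b := by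
        rw [PySem.Str.toList_slice]
        rw [show PySem.Chars.slice content.toList (some (a.length : Int)) none
            = content.toList.drop (a.length : Int).toNat from PySem.List.slice_from _ (by omega)]
        rw [hab]
        simp
      simp [String.toList_append, hsl1, hsl2]
    · have hsent : (PySem.Str.split? content ".").getD [] = [String.ofList content.toList] := by
        rw [hsplit, dotSplit_nodot _ [] hdot]
        simp
      rw [hsent]
      rw [if_neg (by simp)]
      have hrf : PySem.Str.rfind content "." = -1 := by
        show PySem.Chars.rfind content.toList ['.'] = -1
        exact rfind_nodot _ hdot
      rw [hrf, if_pos rfl]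
      refine String.toList_inj.mp ?_
      rw [PySem.Str.toList_join]
      simp only [List.map_cons, List.map_nil, List.map_append, String.toList_ofList,
        String.toList_append]
      simp [PySem.Chars.join_cons_cons, PySem.Chars.join_singleton,
        show (".".toList) = ['.'] from rfl, show (" ".toList) = [' '] from rfl,
        show (". ".toList) = ['.', ' '] from rfl]
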